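-- pv_equiv track=rewrite | github.com/duanribeiro/lost_ark_price_market_history | best_combinations/task_best_combinations.py | discover_books_combinations
-- ===== SOURCE A (Python) =====
-- def discover_unique_list(dup_list):
--     res_list = []
--     for i in range(len(dup_list)):
--         if dup_list[i] not in dup_list[i + 1:]:
--             res_list.append(dup_list[i])
--     return res_list
--
-- def discover_books_combinations(engravings_to_max):
--     books = []
--     book_keys = list(engravings_to_max.keys())
--
--     for engraving_1 in book_keys:
--         for engraving_2 in book_keys:
--             if engraving_1 == engraving_2:
--                 continue
--             books.append({
--                 engraving_1: 12,
--                 engraving_2: 9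
--             })
--             books.append({
--                 engraving_1: 9,
--                 engraving_2: 12
--             })
--
--     return discover_unique_list(dup_list=books)
-- ===== SOURCE B (Python) =====
-- def discover_books_combinations(engravings_to_max):
--     books = []
--     prev = []
--     for key in engravings_to_max.keys():
--         for earlier in prev:
--             books.append({key: 12, earlier: 9})
--             books.append({key: 9, earlier: 12})
--         prev.append(key)
--     return books
-- ===== Notes on version B (the rewrite author's own statement) =====
-- stated objective: faster
-- what changed: B emits each unordered key pair once, directly in the surviving order (outer key paired with all earlier keys, 12/9 then 9/12), eliminating A's over-generation of all ordered pairs and its quadratic-scan deduplication pass.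
import Mathlib
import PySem

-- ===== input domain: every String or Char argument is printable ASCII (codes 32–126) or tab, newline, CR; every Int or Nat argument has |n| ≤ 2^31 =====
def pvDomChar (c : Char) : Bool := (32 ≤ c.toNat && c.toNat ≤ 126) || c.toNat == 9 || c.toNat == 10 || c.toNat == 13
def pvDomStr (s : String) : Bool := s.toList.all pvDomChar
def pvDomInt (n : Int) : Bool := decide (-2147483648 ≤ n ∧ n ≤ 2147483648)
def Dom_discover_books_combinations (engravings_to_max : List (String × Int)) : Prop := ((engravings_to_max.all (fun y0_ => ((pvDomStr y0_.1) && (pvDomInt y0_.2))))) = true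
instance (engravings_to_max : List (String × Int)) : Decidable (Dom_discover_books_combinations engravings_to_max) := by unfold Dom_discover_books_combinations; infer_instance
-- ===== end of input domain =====

-- B replaces A's generate-all-ordered-pairs + quadratic last-occurrence dedup scan by a single
-- triangular pass that emits each surviving dict pair directly (objective: faster, O(n^2) vs O(n^4)).


-- ===== PORT A =====

-- Python dict lookup on an association list with distinct keys (first match); exact for the
-- two-entry distinct-key dicts compared here
def pvLookup : List (String × Int) → String → Option Int
  | [], _ => none
  | (k, v) :: t, x => if k == x then some v else pvLookup t x

-- Python 'a == b' on dicts: same size and every key of a maps to the same value in b;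
-- exact for dicts (distinct keys), which is all this file compares
def pvDictEq (a b : List (String × Int)) : Bool :=
  a.length == b.length && a.all (fun kv => pvLookup b kv.1 == some kv.2)

-- Python 'x in lst' (list of dicts): any element == x
def pvMemDict (x : List (String × Int)) (l : List (List (String × Int))) : Bool :=
  l.any (fun y => pvDictEq x y)

-- A's discover_unique_list: keep dup_list[i] iff it does not reappear in dup_list[i+1:];
-- the obvious structural recursion over the same traversal (each element checked against its suffix,
-- kept elements in original order)
def discover_unique_list : List (List (String × Int)) → List (List (String × Int))
  | [] => []
  | x :: t => if pvMemDict x t then discover_unique_list t else x :: discover_unique_list t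

def discover_books_combinations (engravings_to_max : List (String × Int)) : List (List (String × Int)) :=
  -- list(engravings_to_max.keys()): the distinct keys in first-insertion order
  let book_keys := PySem.List.dedup (engravings_to_max.map Prod.fst)
  let books := book_keys.foldl (fun acc e1 =>
      book_keys.foldl (fun acc e2 =>
        if e1 == e2 then acc
        else acc ++ [[(e1, (12 : Int)), (e2, (9 : Int))], [(e1, (9 : Int)), (e2, (12 : Int))]]) acc) []
  discover_unique_list books

-- ===== PORT B =====

-- the two dicts '{k: 12, p: 9}' and '{k: 9, p: 12}' B appends for a pair (k, p), k ≠ p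
def pvTpair (k p : String) : List (List (String × Int)) :=
  [[(k, (12 : Int)), (p, (9 : Int))], [(k, (9 : Int)), (p, (12 : Int))]]

-- B's loop state: 'prev' = keys already seen; for each key, pair it with every earlier key
def pvAltGo : List String → List String → List (List (String × Int))
  | _, [] => []
  | prev, k :: rest => prev.flatMap (fun p => pvTpair k p) ++ pvAltGo (prev ++ [k]) rest

def discover_books_combinations_alt (engravings_to_max : List (String × Int)) : List (List (String × Int)) :=
  pvAltGo [] (PySem.List.dedup (engravings_to_max.map Prod.fst))

-- ===== PRECONDITION & SPEC =====
def Spec_discover_books_combinations (engravings_to_max : List (String × Int)) (out : List (List (String × Int))) : Prop := out = discover_books_combinations_alt engravings_to_max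
instance (engravings_to_max : List (String × Int)) (out : List (List (String × Int))) : Decidable (Spec_discover_books_combinations engravings_to_max out) := by unfold Spec_discover_books_combinations; infer_instance

-- ===== CLAIM (what is proved, stated in full; the proofs are below) =====
def Claim_equal_discover_books_combinations : Prop := ∀ (engravings_to_max : List (String × Int)), Dom_discover_books_combinations engravings_to_max → Spec_discover_books_combinations engravings_to_max (discover_books_combinations engravings_to_max)

-- ===== LEMMAS AND PROOFS =====

-- one row of B: k paired with every earlier key
def pvRow (pre : List String) (k : String) : List (List (String × Int)) :=
  pre.flatMap (fun p => pvTpair k p)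

-- one iteration of A's outer loop, as a flatMap
def pvInnerF (k : String) (l : List String) : List (List (String × Int)) :=
  (l.filter (fun e2 => !(k == e2))).flatMap (fun e2 => pvTpair k e2)

theorem pv_foldl_if_skip (p : String → Bool) (g : String → List (List (String × Int))) :
    ∀ (l : List String) (acc : List (List (String × Int))),
      l.foldl (fun a x => if p x then a else a ++ g x) acc
        = acc ++ (l.filter (fun x => !p x)).flatMap g := by
  intro l
  induction l with
  | nil => intro acc; simp
  | cons x t ih =>
    intro acc
    by_cases h : p x = true
    · simp [List.foldl_cons, h, ih, List.filter_cons]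
    · simp only [Bool.not_eq_true] at h
      simp [List.foldl_cons, h, ih, List.filter_cons]

theorem pvMemDict_append (x : List (String × Int)) (l m : List (List (String × Int))) :
    pvMemDict x (l ++ m) = (pvMemDict x l || pvMemDict x m) := by
  simp [pvMemDict, List.any_append]

theorem uniq_cons_mem {x : List (String × Int)} {t : List (List (String × Int))}
    (h : pvMemDict x t = true) : discover_unique_list (x :: t) = discover_unique_list t := by
  simp [discover_unique_list, h]

theorem uniq_cons_not_mem {x : List (String × Int)} {t : List (List (String × Int))}
    (h : pvMemDict x t = false) :
    discover_unique_list (x :: t) = x :: discover_unique_list t := by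
  simp [discover_unique_list, h]

theorem uniq_append_drop {X M : List (List (String × Int))}
    (h : ∀ x ∈ X, pvMemDict x M = true) :
    discover_unique_list (X ++ M) = discover_unique_list M := by
  induction X with
  | nil => simp
  | cons x X' ih =>
    have hx : pvMemDict x (X' ++ M) = true := by
      have := h x (List.mem_cons_self ..)
      simp [pvMemDict_append, this]
    rw [List.cons_append, uniq_cons_mem hx, ih (fun y hy => h y (List.mem_cons_of_mem _ hy))]

theorem uniq_append_keep {X M : List (List (String × Int))}
    (hpw : X.Pairwise (fun a b => pvDictEq a b = false))
    (h : ∀ x ∈ X, pvMemDict x M = false) :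
    discover_unique_list (X ++ M) = X ++ discover_unique_list M := by
  induction X with
  | nil => simp
  | cons x X' ih =>
    rcases List.pairwise_cons.mp hpw with ⟨hhead, htail⟩
    have hx : pvMemDict x (X' ++ M) = false := by
      rw [pvMemDict_append]
      have h1 : pvMemDict x X' = false := by
        simp only [pvMemDict, List.any_eq_false]
        intro y hy; simp [hhead y hy]
      have h2 : pvMemDict x M = false := h x (List.mem_cons_self ..)
      simp [h1, h2]
    rw [List.cons_append, uniq_cons_not_mem hx,
      ih htail (fun y hy => h y (List.mem_cons_of_mem _ hy))]
    simp

theorem mem_pvTpair {y : List (String × Int)} {k p : String} :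
    y ∈ pvTpair k p ↔ y = [(k, 12), (p, 9)] ∨ y = [(k, 9), (p, 12)] := by
  simp [pvTpair]

theorem pvLookup_two_none {a b x : String} {u v : Int} (h1 : a ≠ x) (h2 : b ≠ x) :
    pvLookup [(a, u), (b, v)] x = none := by
  simp [pvLookup, h1, h2]

theorem pvDictEq_false_of_missing {x y : List (String × Int)} {a : String} {u : Int}
    (hmem : (a, u) ∈ x) (h : pvLookup y a = none) : pvDictEq x y = false := by
  have : x.all (fun kv => pvLookup y kv.1 == some kv.2) = false :=
    List.all_eq_false.mpr ⟨(a, u), hmem, by simp [h]⟩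
  simp [pvDictEq, this]

theorem pvDictEq_false_of_value {x y : List (String × Int)} {a : String} {u w : Int}
    (hmem : (a, u) ∈ x) (h : pvLookup y a = some w) (hne : w ≠ u) : pvDictEq x y = false := by
  have : x.all (fun kv => pvLookup y kv.1 == some kv.2) = false :=
    List.all_eq_false.mpr ⟨(a, u), hmem, by simp [h, hne]⟩
  simp [pvDictEq, this]

theorem pvDictEq_swap1 {r s : String} (h : r ≠ s) :
    pvDictEq [(r, 12), (s, 9)] [(s, 9), (r, 12)] = true := by
  simp [pvDictEq, pvLookup, pvTpair, h, Ne.symm h]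

theorem pvDictEq_swap2 {r s : String} (h : r ≠ s) :
    pvDictEq [(r, 9), (s, 12)] [(s, 12), (r, 9)] = true := by
  simp [pvDictEq, pvLookup, pvTpair, h, Ne.symm h]

-- the dicts in a row pvRow pre r are pairwise unequal (distinct second keys / distinct values at r)
theorem pvRow_pairwise {pre : List String} {r : String} (hnd : pre.Nodup) (hr : r ∉ pre) :
    (pvRow pre r).Pairwise (fun a b => pvDictEq a b = false) := by
  induction pre with
  | nil => simp [pvRow]
  | cons q pre' ih =>
    have hq : q ∉ pre' := (List.nodup_cons.mp hnd).1
    have hnd' : pre'.Nodup := (List.nodup_cons.mp hnd).2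
    have hrq : r ≠ q := fun hh => hr (hh ▸ List.mem_cons_self ..)
    have hr' : r ∉ pre' := fun hh => hr (List.mem_cons_of_mem _ hh)
    have hstep : pvRow (q :: pre') r = pvTpair r q ++ pvRow pre' r := by simp [pvRow]
    rw [hstep]
    refine List.pairwise_append.mpr ⟨?_, ih hnd' hr', ?_⟩
    · -- within pvTpair r q: values at key r differ (12 vs 9)
      refine List.pairwise_cons.mpr ⟨?_, by simp⟩
      intro y hy
      have hy' : y = [(r, 9), (q, 12)] := by simpa [pvTpair] using hy
      subst hy'
      exact pvDictEq_false_of_value (a := r) (u := 12) (w := 9) (List.mem_cons_self ..) (by simp [pvLookup]) (by decide)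
    · -- across: key q is absent from any dict of pvRow pre' r
      intro a ha b hb
      rcases List.mem_flatMap.mp hb with ⟨q', hq', hbq'⟩
      have hq'q : q' ≠ q := fun hh => hq (hh ▸ hq')
      have hlook : pvLookup b q = none := by
        rcases mem_pvTpair.mp hbq' with hb' | hb' <;> subst hb' <;>
          exact pvLookup_two_none hrq hq'q
      rcases mem_pvTpair.mp ha with ha' | ha'
      · subst ha'; refine pvDictEq_false_of_missing (a := q) (u := 9) ?_ hlook; simp
      · subst ha'; refine pvDictEq_false_of_missing (a := q) (u := 12) ?_ hlook; simp

theorem pv_main : ∀ (rest pre : List String), (pre ++ rest).Nodup →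
    discover_unique_list (rest.flatMap (fun p => pvRow pre p ++ pvInnerF p rest))
      = pvAltGo pre rest := by
  intro rest
  induction rest with
  | nil => intro pre _; simp [pvAltGo, discover_unique_list]
  | cons r rest' ih =>
    intro pre hnd
    rcases List.nodup_append'.mp hnd with ⟨hpre, hrr, hdisj⟩
    have hrrest : r ∉ rest' := (List.nodup_cons.mp hrr).1
    have hrest' : rest'.Nodup := (List.nodup_cons.mp hrr).2
    have hrpre : r ∉ pre := fun h => hdisj h (List.mem_cons_self ..)
    have hdisj' : ∀ q ∈ pre, q ∉ rest' := fun q hq hq' => hdisj hq (List.mem_cons_of_mem _ hq')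
    have hqr : ∀ q ∈ pre, q ≠ r := fun q hq h => hrpre (h ▸ hq)
    have hnd2 : ((pre ++ [r]) ++ rest').Nodup := by
      rw [List.append_assoc]; simpa using hnd
    -- rewrite the generated list into:  row ++ (dropped a-block ++ rest of the problem)
    have h1 : pvInnerF r (r :: rest') = pvInnerF r rest' := by
      simp [pvInnerF, List.filter_cons]
    have h2 : rest'.flatMap (fun p => pvRow pre p ++ pvInnerF p (r :: rest'))
        = rest'.flatMap (fun p => pvRow (pre ++ [r]) p ++ pvInnerF p rest') := by
      apply List.flatMap_congr
      intro p hp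
      have hpr : p ≠ r := fun h => hrrest (h ▸ hp)
      have hfil : pvInnerF p (r :: rest') = pvTpair p r ++ pvInnerF p rest' := by
        simp [pvInnerF, List.filter_cons, hpr]
      have hrow : pvRow (pre ++ [r]) p = pvRow pre p ++ pvTpair p r := by
        simp [pvRow, List.flatMap_append]
      rw [hfil, hrow, List.append_assoc]
    set Z := rest'.flatMap (fun p => pvRow (pre ++ [r]) p ++ pvInnerF p rest') with hZ
    -- membership characterisations
    have hmemY : ∀ y ∈ pvInnerF r rest',
        ∃ s, s ∈ rest' ∧ r ≠ s ∧ (y = [(r, 12), (s, 9)] ∨ y = [(r, 9), (s, 12)]) := by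
      intro y hy
      rcases List.mem_flatMap.mp hy with ⟨s, hs, hys⟩
      rcases List.mem_filter.mp hs with ⟨hs', hcond⟩
      exact ⟨s, hs', by simpa using hcond, mem_pvTpair.mp hys⟩
    have hZchar : ∀ y ∈ Z, ∃ (a b : String) (u v : Int),
        y = [(a, u), (b, v)] ∧ a ∈ rest' ∧ (b ∈ pre ∨ b = r ∨ b ∈ rest') := by
      intro y hy
      rcases List.mem_flatMap.mp hy with ⟨p, hp, hy2⟩
      rcases List.mem_append.mp hy2 with hy3 | hy3
      · rcases List.mem_flatMap.mp hy3 with ⟨q', hq', hy4⟩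
        have hq'' : q' ∈ pre ∨ q' = r := by
          rcases List.mem_append.mp hq' with h | h
          · exact Or.inl h
          · exact Or.inr (by simpa using h)
        have hq''' : q' ∈ pre ∨ q' = r ∨ q' ∈ rest' := by tauto
        rcases mem_pvTpair.mp hy4 with h4 | h4
        · exact ⟨p, q', 12, 9, h4, hp, hq'''⟩
        · exact ⟨p, q', 9, 12, h4, hp, hq'''⟩
      · rcases List.mem_flatMap.mp hy3 with ⟨s, hs, hy4⟩
        have hs' : s ∈ rest' := (List.mem_filter.mp hs).1
        rcases mem_pvTpair.mp hy4 with h4 | h4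
        · exact ⟨p, s, 12, 9, h4, hp, Or.inr (Or.inr hs')⟩
        · exact ⟨p, s, 9, 12, h4, hp, Or.inr (Or.inr hs')⟩
    -- (K) the row's dicts never reappear later
    have hK2 : ∀ x ∈ pvRow pre r, pvMemDict x (pvInnerF r rest' ++ Z) = false := by
      intro x hx
      rcases List.mem_flatMap.mp hx with ⟨q, hqpre, hxq⟩
      have hqnr : q ≠ r := hqr q hqpre
      have hqrest : q ∉ rest' := hdisj' q hqpre
      rw [pvMemDict_append]
      have hY : pvMemDict x (pvInnerF r rest') = false := by
        simp only [pvMemDict, List.any_eq_false]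
        intro y hy
        rcases hmemY y hy with ⟨s, hs, hrs, hy'⟩
        have hsq : s ≠ q := fun h => hqrest (h ▸ hs)
        have hlook : pvLookup y q = none := by
          rcases hy' with h' | h' <;> subst h' <;> exact pvLookup_two_none (Ne.symm hqnr) hsq
        rcases mem_pvTpair.mp hxq with h' | h'
        · subst h'; simp only [Bool.not_eq_true]; refine pvDictEq_false_of_missing (a := q) (u := 9) ?_ hlook; simp
        · subst h'; simp only [Bool.not_eq_true]; refine pvDictEq_false_of_missing (a := q) (u := 12) ?_ hlook; simp
      have hZ2 : pvMemDict x Z = false := by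
        simp only [pvMemDict, List.any_eq_false]
        intro y hy
        rcases hZchar y hy with ⟨a, b, u, v, hy', ha, hb⟩
        have hanr : a ≠ r := fun h => hrrest (h ▸ ha)
        have hanq : a ≠ q := fun h => hqrest (h ▸ ha)
        rcases hb with hbpre | hbr | hbrest
        · have hbnr : b ≠ r := hqr b hbpre
          have hlook : pvLookup y r = none := by subst hy'; exact pvLookup_two_none hanr hbnr
          rcases mem_pvTpair.mp hxq with h' | h'
          · subst h'; simp only [Bool.not_eq_true]; refine pvDictEq_false_of_missing (a := r) (u := 12) ?_ hlook; simp
          · subst h'; simp only [Bool.not_eq_true]; refine pvDictEq_false_of_missing (a := r) (u := 9) ?_ hlook; simp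
        · have hbnq : b ≠ q := by rw [hbr]; exact Ne.symm hqnr
          have hlook : pvLookup y q = none := by subst hy'; exact pvLookup_two_none hanq hbnq
          rcases mem_pvTpair.mp hxq with h' | h'
          · subst h'; simp only [Bool.not_eq_true]; refine pvDictEq_false_of_missing (a := q) (u := 9) ?_ hlook; simp
          · subst h'; simp only [Bool.not_eq_true]; refine pvDictEq_false_of_missing (a := q) (u := 12) ?_ hlook; simp
        · have hbnr : b ≠ r := fun h => hrrest (h ▸ hbrest)
          have hlook : pvLookup y r = none := by subst hy'; exact pvLookup_two_none hanr hbnr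
          rcases mem_pvTpair.mp hxq with h' | h'
          · subst h'; simp only [Bool.not_eq_true]; refine pvDictEq_false_of_missing (a := r) (u := 12) ?_ hlook; simp
          · subst h'; simp only [Bool.not_eq_true]; refine pvDictEq_false_of_missing (a := r) (u := 9) ?_ hlook; simp
      simp [hY, hZ2]
    -- (D) every r-dict of the dropped block reappears in Z
    have hD1 : ∀ x ∈ pvInnerF r rest', pvMemDict x Z = true := by
      intro x hx
      rcases hmemY x hx with ⟨s, hs, hrs, hx'⟩
      have hwit : ∀ (w : List (String × Int)), w ∈ pvTpair s r → w ∈ Z := by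
        intro w hw
        refine List.mem_flatMap.mpr ⟨s, hs, List.mem_append.mpr (Or.inl ?_)⟩
        exact List.mem_flatMap.mpr ⟨r, by simp, hw⟩
      simp only [pvMemDict]
      rcases hx' with h' | h'
      · subst h'
        exact List.any_eq_true.mpr
          ⟨[(s, 9), (r, 12)], hwit _ (by simp [pvTpair]), pvDictEq_swap1 hrs⟩
      · subst h'
        exact List.any_eq_true.mpr
          ⟨[(s, 12), (r, 9)], hwit _ (by simp [pvTpair]), pvDictEq_swap2 hrs⟩
    calc discover_unique_list ((r :: rest').flatMap (fun p => pvRow pre p ++ pvInnerF p (r :: rest')))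
        = discover_unique_list (pvRow pre r ++ (pvInnerF r rest' ++ Z)) := by
          rw [List.flatMap_cons, h1, h2, List.append_assoc]
      _ = pvRow pre r ++ discover_unique_list (pvInnerF r rest' ++ Z) :=
          uniq_append_keep (pvRow_pairwise hpre hrpre) hK2
      _ = pvRow pre r ++ discover_unique_list Z := by rw [uniq_append_drop hD1]
      _ = pvAltGo pre (r :: rest') := by rw [ih (pre ++ [r]) hnd2]; simp [pvAltGo, pvRow]

theorem books_eq_flatMap (ks : List String) :
    (ks.foldl (fun acc e1 => ks.foldl (fun acc e2 =>
        if e1 == e2 then acc else acc ++ pvTpair e1 e2) acc) [])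
      = ks.flatMap (fun e1 => pvInnerF e1 ks) := by
  have hbody : (fun (acc : List (List (String × Int))) e1 => ks.foldl (fun a e2 =>
      if e1 == e2 then a else a ++ pvTpair e1 e2) acc)
      = fun acc e1 => acc ++ pvInnerF e1 ks := by
    funext acc e1
    exact pv_foldl_if_skip (fun e2 => e1 == e2) (fun e2 => pvTpair e1 e2) ks acc
  rw [hbody, PySem.List.foldl_append_eq_flatMap]
  simp

-- ===== VERDICT (by name: the statement is the Claim_ definition above) =====
theorem discover_books_combinations_spec : Claim_equal_discover_books_combinations := by
  intro e _
  unfold Spec_discover_books_combinations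
  unfold discover_books_combinations discover_books_combinations_alt
  set ks := PySem.List.dedup (e.map Prod.fst) with hks
  have hnd : ks.Nodup := PySem.List.nodup_dedup _
  show discover_unique_list (ks.foldl (fun acc e1 => ks.foldl (fun acc e2 =>
      if e1 == e2 then acc else acc ++ pvTpair e1 e2) acc) []) = pvAltGo [] ks
  rw [books_eq_flatMap ks]
  have := pv_main ks [] (by simpa using hnd)
  simpa [pvRow] using this
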